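-- pv_equiv track=rewrite | github.com/ibtSdan/1Day1Problem | 프로그래머스/2/138476. 귤 고르기/귤 고르기.py | solution
-- ===== SOURCE A (Python) =====
-- def solution(k, tangerine):
--     ans = 0
--     count = [0] * 10000001
--     for i in tangerine:
--         count[i] += 1
--     count.sort(reverse=True)
--
--     for i in count:
--         if i:
--             ans += 1
--             if i>=k:
--                 return ans
--             else:
--                 k -= i
-- ===== SOURCE B (Python) =====
-- def solution(k, tangerine):
--     count = [0] * 10000001
--     for i in tangerine:
--         count[i] += 1
--     # counting sort on the frequencies instead of sorting the whole array
--     bucket = {}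
--     maxc = 0
--     for c in count:
--         if c:
--             bucket[c] = bucket.get(c, 0) + 1
--             if c > maxc:
--                 maxc = c
--     ans = 0
--     for c in range(maxc, 0, -1):
--         for _ in range(bucket.get(c, 0)):
--             ans += 1
--             if c >= k:
--                 return ans
--             k -= c
--     return ans
-- ===== Notes on version B (the rewrite author's own statement) =====
-- stated objective: alternative
-- what changed: B replaces A's full descending sort of the 10^7-entry frequency array by a counting sort on the frequency values (one scan builds bucket[c] = number of sizes occurring c times and tracks the maximum count, then c is walked from that maximum down to 1); Pre_ excludes the inputs on which A returns None instead of an int (empty list, or k exceeding the number of tangerines, where B naturally returns the number of distinct sizes seen) and those on which A raises IndexError (a size outside the fixed array's index range).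
-- outside the precondition, e.g. on solution(0, []): A returns None, B returns 0; on solution(3, [1, 1]): A returns None, B returns 1; on solution(5, [2, 2, 3]): A returns None, B returns 2
import Mathlib
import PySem

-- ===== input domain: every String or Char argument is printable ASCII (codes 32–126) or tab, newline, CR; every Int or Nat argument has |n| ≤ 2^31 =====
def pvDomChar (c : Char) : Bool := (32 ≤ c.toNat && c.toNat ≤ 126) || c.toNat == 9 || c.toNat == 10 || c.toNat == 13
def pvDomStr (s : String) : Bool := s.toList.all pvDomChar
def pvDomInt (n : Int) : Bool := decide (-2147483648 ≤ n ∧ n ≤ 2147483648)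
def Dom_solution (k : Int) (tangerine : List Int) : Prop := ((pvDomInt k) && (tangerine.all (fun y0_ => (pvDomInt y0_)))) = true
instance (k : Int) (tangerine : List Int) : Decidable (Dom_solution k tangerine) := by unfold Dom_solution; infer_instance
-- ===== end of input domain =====

-- B replaces A's descending sort of the whole 10^7-entry frequency array by a counting sort on the
-- frequency values (one scan builds bucket[c] = number of sizes occurring c times, then c is walked
-- from the maximal count down); same result, different algorithm ('alternative', no speed claim).

-- ===== PORT A =====
-- count[i] += 1  (Python list indexing via pyIdx?: a negative i counts from the end, out of range
-- = IndexError, excluded by Pre_, where this port leaves the array unchanged; the counts are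
-- nonnegative ints, held as Nat in an Array)
def pyIncAt (count : Array Nat) (i : Int) : Array Nat :=
  match PySem.List.pyIdx? count.size i with
  | some n => count.setIfInBounds n (count.getD n 0 + 1)
  | none => count

-- the 'for i in count' loop; falling off the end is Python's 'return None', excluded by Pre_ (0 here)
def solGo : List Nat → Int → Int → Int
  | [], _, _ => 0
  | c :: rest, ans, k =>
    if c ≠ 0 then
      if (c : Int) ≥ k then ans + 1 else solGo rest (ans + 1) (k - (c : Int))
    else solGo rest ans k

def solution (k : Int) (tangerine : List Int) : Int :=
  let count := tangerine.foldl pyIncAt (Array.replicate 10000001 0)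
  -- count.sort(reverse=True): on integer keys Python's reverse sort is the reverse of the
  -- ascending stable sort; Nat.ble is the library's ≤ comparator
  let sorted := (count.toList.mergeSort Nat.ble).reverse
  solGo sorted 0 k

-- ===== PORT B =====
-- inner 'for _ in range(bucket.get(c, 0))': .inl = early return, .inr = (ans, k) flows on
def solAltInner (c : Nat) : Nat → Int → Int → Int ⊕ (Int × Int)
  | 0, ans, k => .inr (ans, k)
  | m+1, ans, k =>
    if (c : Int) ≥ k then .inl (ans + 1) else solAltInner c m (ans + 1) (k - (c : Int))

-- 'for c in range(maxc, 0, -1)' counting down from maxc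
def solAltOuter (bucket : PySem.Dict Nat Int) : Nat → Int → Int → Int
  | 0, ans, _ => ans
  | c+1, ans, k =>
    match solAltInner (c+1) (PySem.Dict.getD bucket (c+1) 0).toNat ans k with
    | .inl a => a
    | .inr (ans', k') => solAltOuter bucket c ans' k'

def solution_alt (k : Int) (tangerine : List Int) : Int :=
  let count := tangerine.foldl pyIncAt (Array.replicate 10000001 0)
  -- 'for c in count: if c: bucket[c] = bucket.get(c,0)+1; if c > maxc: maxc = c'
  let bm := count.foldl (fun bm c =>
      if c ≠ 0 then
        (PySem.Dict.insert bm.1 c (PySem.Dict.getD bm.1 c 0 + 1),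
         if c > bm.2 then c else bm.2)
      else bm)
    ((PySem.Dict.mk [] : PySem.Dict Nat Int), (0 : Nat))
  solAltOuter bm.1 bm.2 0 k

-- ===== PRECONDITION & SPEC =====
-- A returns no int (Python None) when tangerine is empty or k exceeds the number of tangerines, and
-- raises IndexError when some size lies outside the index range of its fixed array [-10000001, 10000000];
-- Pre_ excludes exactly those inputs.
def Pre_solution (k : Int) (tangerine : List Int) : Prop :=
  tangerine ≠ [] ∧ k ≤ (tangerine.length : Int) ∧
    ∀ i ∈ tangerine, -10000001 ≤ i ∧ i < 10000001
instance (k : Int) (tangerine : List Int) : Decidable (Pre_solution k tangerine) := by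
  unfold Pre_solution; infer_instance
def pvWitness_solution : Int × List Int := (2, [1, 2, 2])

def Spec_solution (k : Int) (tangerine : List Int) (out : Int) : Prop := out = solution_alt k tangerine
instance (k : Int) (tangerine : List Int) (out : Int) : Decidable (Spec_solution k tangerine out) := by
  unfold Spec_solution; infer_instance

-- ===== CLAIM (what is proved, stated in full; the proofs are below) =====
def Claim_equal_solution : Prop := ∀ (k : Int) (tangerine : List Int), Dom_solution k tangerine → Pre_solution k tangerine → Spec_solution k tangerine (solution k tangerine)

-- ===== LEMMAS AND PROOFS =====

-- the normalised array index of a size i (Python's wraparound for negative i)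
def nrmI (i : Int) : Int := PySem.Int.mod i 10000001

-- the list shadow of pyIncAt (the ports run on the Array; the proofs run here)
def pyIncAtL (count : List Nat) (i : Int) : List Nat :=
  match PySem.List.pyIdx? count.length i with
  | some n => count.set n (count.getD n 0 + 1)
  | none => count

-- the value blocks B walks: replicate (bucket.get c) copies of c, for c = C, C-1, ..., 1
def blocks (g : Nat → Int) : Nat → List Nat
  | 0 => []
  | c+1 => List.replicate (g (c+1)).toNat (c+1) ++ blocks g c

theorem getD_toList (a : Array Nat) (n : Nat) (d : Nat) : a.getD n d = a.toList.getD n d := by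
  unfold Array.getD
  rw [List.getD_eq_getElem?_getD]
  split
  · next h =>
    rw [List.getElem?_eq_getElem (by simpa using h)]
    simp
  · next h =>
    rw [List.getElem?_eq_none (by simpa using Nat.le_of_not_lt h)]
    rfl

theorem toList_pyIncAt (a : Array Nat) (i : Int) : (pyIncAt a i).toList = pyIncAtL a.toList i := by
  unfold pyIncAt pyIncAtL
  rw [Array.length_toList]
  cases h : PySem.List.pyIdx? a.size i with
  | none => rfl
  | some n => simp [Array.toList_setIfInBounds, getD_toList]

theorem toList_foldl_pyIncAt (t : List Int) (a : Array Nat) :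
    (t.foldl pyIncAt a).toList = t.foldl pyIncAtL a.toList := by
  induction t generalizing a with
  | nil => rfl
  | cons i t ih => rw [List.foldl_cons, List.foldl_cons, ih, toList_pyIncAt]

theorem pyIdx_norm (n : Nat) (i : Int) (h0 : -(n : Int) ≤ i) (h1 : i < (n : Int)) :
    PySem.List.pyIdx? n i = some (PySem.Int.mod i (n : Int)).toNat := by
  have hn : (0:Int) < n := by omega
  rw [PySem.Int.mod_eq_emod_of_pos hn]
  unfold PySem.List.pyIdx?
  by_cases hi : 0 ≤ i
  · have : i % (n:Int) = i := Int.emod_eq_of_lt hi h1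
    simp [hi, h1, this]
  · have hlt : i < 0 := by omega
    have h2 : i % (n:Int) = i + n := by
      have h3 : (i + n) % n = i % n := by
        simpa using Int.add_mul_emod_self_left (a := i) (b := 1) (c := (n:Int))
      have h4 : (0:Int) ≤ i + n := by omega
      have h6 : (i + n) % n = i + n := Int.emod_eq_of_lt h4 (by omega)
      omega
    simp only [hi, if_false, if_pos h0]
    congr 1
    omega

theorem getD_set (l : List Nat) (n m : Nat) (v : Nat) (hn : n < l.length) :
    (l.set n v).getD m 0 = if m = n then v else l.getD m 0 := by
  rw [List.getD_eq_getElem?_getD, List.getElem?_set, List.getD_eq_getElem?_getD]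
  by_cases h1 : n = m
  · subst h1; simp [hn]
  · rw [if_neg h1, if_neg (by omega)]

theorem sum_set_nat (l : List Nat) (n : Nat) (v : Nat) (hn : n < l.length) :
    (l.set n v).sum + l.getD n 0 = l.sum + v := by
  induction l generalizing n with
  | nil => simp at hn
  | cons a l ih =>
    cases n with
    | zero => simp [List.set]; omega
    | succ n =>
      have hn' : n < l.length := by simpa using hn
      have := ih n hn'
      simp only [List.set, List.sum_cons, List.getD_cons_succ]
      omega

theorem foldl_pyIncAtL_char (t : List Int) (c : List Nat)
    (hlen : c.length = 10000001) (hr : ∀ i ∈ t, -10000001 ≤ i ∧ i < 10000001) :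
    (t.foldl pyIncAtL c).length = 10000001 ∧
    (∀ p : Nat, p < 10000001 →
      (t.foldl pyIncAtL c).getD p 0 = c.getD p 0 + (t.map nrmI).count (p : Int)) ∧
    (t.foldl pyIncAtL c).sum = c.sum + t.length := by
  induction t generalizing c with
  | nil => simpa using hlen
  | cons i t ih =>
    obtain ⟨hi0, hi1⟩ := hr i (by simp)
    have hcl : (c.length : Int) = 10000001 := by rw [hlen]; norm_num
    have hmn : 0 ≤ PySem.Int.mod i 10000001 := PySem.Int.mod_nonneg i (by norm_num)
    have hml : PySem.Int.mod i 10000001 < 10000001 := PySem.Int.mod_lt i (by norm_num)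
    have hset : pyIncAtL c i = c.set (nrmI i).toNat (c.getD (nrmI i).toNat 0 + 1) := by
      unfold pyIncAtL
      rw [pyIdx_norm c.length i (by omega) (by omega), hcl]
      rfl
    have hnt : (nrmI i).toNat < c.length := by
      unfold nrmI; omega
    have hlen' : (pyIncAtL c i).length = 10000001 := by rw [hset, List.length_set, hlen]
    have hr' : ∀ j ∈ t, -10000001 ≤ j ∧ j < 10000001 := fun j hj => hr j (by simp [hj])
    obtain ⟨IH1, IH2, IH3⟩ := ih (pyIncAtL c i) hlen' hr'
    refine ⟨by simpa using IH1, ?_, ?_⟩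
    · intro p hp
      rw [List.foldl_cons, IH2 p hp, hset, getD_set _ _ _ _ hnt]
      rw [List.map_cons, List.count_cons]
      by_cases hpeq : p = (nrmI i).toNat
      · have : nrmI i = (p : Int) := by unfold nrmI at *; omega
        rw [if_pos hpeq, this]
        simp only [beq_self_eq_true, if_pos, Int.toNat_natCast]
        omega
      · have : ¬ (nrmI i == (p : Int)) := by
          simp only [beq_iff_eq]; unfold nrmI at *; omega
        rw [if_neg hpeq]
        simp only [this]
        simp
    · rw [List.foldl_cons, IH3, hset]
      have := sum_set_nat c (nrmI i).toNat (c.getD (nrmI i).toNat 0 + 1) hnt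
      simp only [List.length_cons]
      omega

theorem solGo_filter (l : List Nat) (ans k : Int) :
    solGo l ans k = solGo (l.filter (fun c => decide (c ≠ 0))) ans k := by
  induction l generalizing ans k with
  | nil => rfl
  | cons c rest ih =>
    by_cases hc : c = 0
    · subst hc; simp [solGo, List.filter_cons, ih]
    · rw [List.filter_cons, if_pos (by simp [hc])]
      simp only [solGo, if_pos hc]
      split_ifs with h
      · simp [hc, h]
      · simp [hc, h, ih]

theorem sum_filter_ne_zero (l : List Nat) :
    (l.filter (fun c => decide (c ≠ 0))).sum = l.sum := by
  induction l with
  | nil => rfl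
  | cons c rest ih =>
    rw [List.filter_cons]
    by_cases hc : c = 0
    · subst hc; simpa using ih
    · rw [if_pos (by simp [hc]), List.sum_cons, List.sum_cons, ih]

theorem solAltInner_inr (c : Nat) (m : Nat) (ans k a' k' : Int)
    (h : solAltInner c m ans k = .inr (a', k')) :
    k' = k - (m : Int) * (c : Int) ∧ (m = 0 ∨ 1 ≤ k') := by
  induction m generalizing ans k with
  | zero =>
    simp only [solAltInner] at h
    cases h; constructor; · push_cast; ring
    · exact Or.inl rfl
  | succ m ih =>
    simp only [solAltInner] at h
    split_ifs at h with hck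
    obtain ⟨h1, h2⟩ := ih _ _ h
    constructor
    · rw [h1]; push_cast; ring
    · right
      rcases h2 with h2 | h2
      · subst h2; simp at h1; omega
      · exact h2

theorem solGo_block (c : Nat) (hc : c ≠ 0) (m : Nat) (rest : List Nat) (ans k : Int) :
    solGo (List.replicate m c ++ rest) ans k =
      match solAltInner c m ans k with
      | .inl a => a
      | .inr (a', k') => solGo rest a' k' := by
  induction m generalizing ans k with
  | zero => rfl
  | succ m ih =>
    rw [List.replicate_succ, List.cons_append]
    simp only [solGo, solAltInner, if_pos hc]
    split_ifs with h
    · rfl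
    · rw [ih]

theorem blocks_mem (g : Nat → Int) (C : Nat) : ∀ x ∈ blocks g C, 1 ≤ x ∧ x ≤ C := by
  induction C with
  | zero => simp [blocks]
  | succ C ih =>
    intro x hx
    rw [blocks, List.mem_append] at hx
    rcases hx with hx | hx
    · have := List.eq_of_mem_replicate hx
      subst this; omega
    · obtain ⟨h1, h2⟩ := ih x hx
      omega

theorem blocks_count (g : Nat → Int) (C : Nat) (v : Nat) :
    (blocks g C).count v = if 1 ≤ v ∧ v ≤ C then (g v).toNat else 0 := by
  induction C with
  | zero => simp [blocks]; omega
  | succ C ih =>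
    rw [blocks, List.count_append, List.count_replicate]
    by_cases hv : v = C + 1
    · subst hv
      have h0 : ¬ (1 ≤ C + 1 ∧ C + 1 ≤ C) := by omega
      rw [if_neg h0] at ih
      simp only [beq_self_eq_true, if_true]
      rw [if_pos (by omega)]
      omega
    · rw [if_neg (by simpa [beq_iff_eq] using fun h => hv h.symm)]
      rw [ih]
      by_cases h1 : 1 ≤ v ∧ v ≤ C
      · rw [if_pos h1, if_pos (by omega)]; omega
      · rw [if_neg h1, if_neg (by omega)]

theorem blocks_pairwise (g : Nat → Int) (C : Nat) :
    (blocks g C).Pairwise (fun a b => b ≤ a) := by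
  induction C with
  | zero => simp [blocks]
  | succ C ih =>
    rw [blocks]
    apply List.pairwise_append.2
    refine ⟨List.pairwise_replicate.2 (by omega), ih, ?_⟩
    intro a ha b hb
    have := List.eq_of_mem_replicate ha
    subst this
    have := (blocks_mem g C b hb).2
    omega

-- B's single scan over the array splits into the counter fold and the max fold over the nonzero values
theorem cond_fold_split (l : List Nat) (d : PySem.Dict Nat Int) (m : Nat) :
    l.foldl (fun bm c =>
        if c ≠ 0 then
          (PySem.Dict.insert bm.1 c (PySem.Dict.getD bm.1 c 0 + 1),
           if c > bm.2 then c else bm.2)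
        else bm) (d, m) =
      ((l.filter (fun c => decide (c ≠ 0))).foldl
          (fun b c => PySem.Dict.insert b c (PySem.Dict.getD b c 0 + 1)) d,
       (l.filter (fun c => decide (c ≠ 0))).foldl (fun m c => if c > m then c else m) m) := by
  induction l generalizing d m with
  | nil => rfl
  | cons c l ih =>
    rw [List.foldl_cons, List.filter_cons]
    by_cases hc : c = 0
    · subst hc
      simp only [ne_eq, not_true_eq_false, if_false, decide_false, Bool.false_eq_true, if_false]
      exact ih d m
    · simp only [ne_eq, hc, not_false_eq_true, if_true, decide_true, if_true, List.foldl_cons]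
      exact ih _ _

theorem foldl_max_ge (l : List Nat) (m : Nat) :
    m ≤ l.foldl (fun m c => if c > m then c else m) m ∧
    ∀ x ∈ l, x ≤ l.foldl (fun m c => if c > m then c else m) m := by
  induction l generalizing m with
  | nil => simp
  | cons i l ih =>
    simp only [List.foldl_cons]
    obtain ⟨h1, h2⟩ := ih (if i > m then i else m)
    constructor
    · calc m ≤ (if i > m then i else m) := by split_ifs <;> omega
        _ ≤ _ := h1
    · intro x hx
      rcases List.mem_cons.1 hx with rfl | hx
      · calc x ≤ (if x > m then x else m) := by split_ifs <;> omega
          _ ≤ _ := h1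
      · exact h2 x hx

theorem solGo_blocks_pos (bucket : PySem.Dict Nat Int) (C : Nat) (ans k : Int)
    (hk : 1 ≤ k) (hsum : k ≤ ((blocks (fun v => bucket.getD v 0) C).sum : Int)) :
    solGo (blocks (fun v => bucket.getD v 0) C) ans k = solAltOuter bucket C ans k := by
  induction C generalizing ans k with
  | zero => simp only [blocks, List.sum_nil, Nat.cast_zero] at hsum; omega
  | succ C ih =>
    rw [blocks]
    have hc : C + 1 ≠ 0 := by omega
    rw [solGo_block _ hc]
    show _ = solAltOuter bucket (C+1) ans k
    rw [solAltOuter]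
    cases hinner : solAltInner (C+1) (bucket.getD (C+1) 0).toNat ans k with
    | inl a => rfl
    | inr p =>
      obtain ⟨a', k'⟩ := p
      obtain ⟨hk', hm⟩ := solAltInner_inr _ _ _ _ _ _ hinner
      have h1 : 1 ≤ k' := by
        rcases hm with hm | hm
        · rw [hm] at hk'; simp at hk'; omega
        · exact hm
      have h2 : k' ≤ ((blocks (fun v => bucket.getD v 0) C).sum : Int) := by
        rw [blocks, List.sum_append, List.sum_replicate, smul_eq_mul] at hsum
        push_cast at hsum hk' ⊢
        omega
      exact ih a' k' h1 h2

theorem solGo_blocks_nonpos (bucket : PySem.Dict Nat Int) (C : Nat) (ans k : Int)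
    (hk : k ≤ 0) (hne : blocks (fun v => bucket.getD v 0) C ≠ []) :
    solGo (blocks (fun v => bucket.getD v 0) C) ans k = solAltOuter bucket C ans k := by
  induction C generalizing ans k with
  | zero => simp [blocks] at hne
  | succ C ih =>
    rw [blocks]
    show _ = solAltOuter bucket (C+1) ans k
    rw [solAltOuter]
    cases hm : (bucket.getD (C+1) 0).toNat with
    | zero =>
      rw [blocks, hm] at hne
      simp only [List.replicate_zero, List.nil_append] at hne
      simp only [List.replicate_zero, List.nil_append, solAltInner]
      exact ih ans k hk hne
    | succ m =>
      rw [List.replicate_succ, List.cons_append]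
      have hge : ((C + 1 : Nat) : Int) ≥ k := by push_cast; omega
      simp only [solGo, solAltInner, if_pos hge]
      rw [if_pos (by omega)]

theorem pairwise_desc_revSort (l : List Nat) :
    ((l.mergeSort Nat.ble).reverse).Pairwise (fun a b : Nat => b ≤ a) := by
  rw [List.pairwise_reverse]
  have := List.sorted_mergeSort (le := Nat.ble)
    (by intro a b c h1 h2; simp [Nat.ble_eq] at *; omega)
    (by intro a b; simp [Nat.ble_eq]; omega) l
  exact this.imp (by intro a b h; simpa [Nat.ble_eq] using h)

theorem desc_eq_of_perm (l1 l2 : List Nat)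
    (h1 : l1.Pairwise (fun a b : Nat => b ≤ a)) (h2 : l2.Pairwise (fun a b : Nat => b ≤ a))
    (hp : l1.Perm l2) : l1 = l2 :=
  List.eq_of_perm_of_sorted (le := fun a b : Nat => b ≤ a)
    (fun a b _ _ x y => le_antisymm y x) h1 h2 hp

theorem solution_eq_alt (k : Int) (t : List Int)
    (hne : t ≠ []) (hkle : k ≤ (t.length : Int))
    (hr : ∀ i ∈ t, -10000001 ≤ i ∧ i < 10000001) :
    solution k t = solution_alt k t := by
  have hcl : (t.foldl pyIncAt (Array.replicate 10000001 0)).toList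
      = t.foldl pyIncAtL (List.replicate 10000001 0) := by
    rw [toList_foldl_pyIncAt, Array.toList_replicate]
  have hrep0 : ∀ p : Nat, (List.replicate 10000001 (0:Nat)).getD p 0 = 0 := by
    intro p
    rw [List.getD_eq_getElem?_getD, List.getElem?_replicate]
    split <;> rfl
  obtain ⟨hlen, hgetD, hsum⟩ :=
    foldl_pyIncAtL_char t (List.replicate 10000001 0) List.length_replicate hr
  simp only [hrep0, List.sum_replicate, smul_eq_mul, Nat.mul_zero, Nat.zero_add] at hgetD hsum
  set cnt := t.foldl pyIncAtL (List.replicate 10000001 0) with hcnt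
  set VALS := cnt.filter (fun c => decide (c ≠ 0)) with hVALS
  set bucket := VALS.foldl (fun b c => PySem.Dict.insert b c (PySem.Dict.getD b c 0 + 1))
    (PySem.Dict.mk ([] : List (Nat × Int))) with hbk
  set M := VALS.foldl (fun m c => if c > m then c else m) (0 : Nat) with hM
  -- B unfolds to solAltOuter
  have hB : solution_alt k t = solAltOuter bucket M 0 k := by
    simp only [solution_alt]
    rw [← Array.foldl_toList, hcl, cond_fold_split]
  -- bucket getD is a counter over VALS
  have hbg : ∀ v : Nat, bucket.getD v 0 = (VALS.count v : Int) := by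
    intro v
    rw [hbk, PySem.Dict.getD_foldl_insert_add_one]
    rw [show (PySem.Dict.mk ([] : List (Nat × Int))).getD v 0 = 0 from rfl]
    omega
  have hv1 : ∀ x ∈ VALS, 1 ≤ x := by
    intro x hx
    rw [hVALS, List.mem_filter] at hx
    have : x ≠ 0 := by simpa using hx.2
    omega
  -- counts of cnt agree with counts of VALS on nonzero values
  have hcount : ∀ v : Nat, v ≠ 0 → cnt.count v = VALS.count v := by
    intro v hv
    rw [hVALS, List.count_filter (by simp [hv])]
  obtain ⟨hM0, hMmax⟩ := foldl_max_ge VALS 0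
  rw [← hM] at hM0 hMmax
  -- the sorted nonzero part of A's array equals B's blocks
  set L := (cnt.mergeSort Nat.ble).reverse with hL
  set F := L.filter (fun c => decide (c ≠ 0)) with hF
  have hLperm : L.Perm cnt := (List.reverse_perm _).trans (List.mergeSort_perm cnt _)
  have hFcount : ∀ v : Nat, F.count v = (blocks (fun v => bucket.getD v 0) M).count v := by
    intro v
    rw [blocks_count]
    by_cases hv : v = 0
    · subst hv
      rw [if_neg (by omega)]
      rw [hF, List.count_eq_zero.2 (by
        intro hmem
        have := List.of_mem_filter hmem
        simp at this)]
    · rw [hF, List.count_filter (by simp [hv])]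
      rw [hLperm.count_eq, hcount v hv, hbg v]
      by_cases hvr : 1 ≤ v ∧ v ≤ M
      · rw [if_pos hvr]
        omega
      · rw [if_neg hvr]
        have : v ∉ VALS := by
          intro hmem
          exact hvr ⟨hv1 v hmem, hMmax v hmem⟩
        rw [List.count_eq_zero.2 this]
  have hFperm : F.Perm (blocks (fun v => bucket.getD v 0) M) := by
    rw [List.perm_iff_count]
    intro v
    exact hFcount v
  have hFpair : F.Pairwise (fun a b : Nat => b ≤ a) :=
    List.Pairwise.sublist List.filter_sublist (pairwise_desc_revSort cnt)
  have hFeq : F = blocks (fun v => bucket.getD v 0) M :=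
    desc_eq_of_perm _ _ hFpair (blocks_pairwise _ _) hFperm
  -- A unfolds to solGo over L, which may be filtered to F
  have hA : solution k t = solGo F 0 k := by
    simp only [solution]
    rw [hcl, ← hL, solGo_filter L, hF]
  have hsumF : F.sum = t.length := by
    rw [hF, sum_filter_ne_zero, hLperm.sum_eq, hsum]
  rw [hA, hB, hFeq]
  by_cases hk : 1 ≤ k
  · exact solGo_blocks_pos bucket M 0 k hk (by rw [← hFeq, hsumF]; exact hkle)
  · apply solGo_blocks_nonpos bucket M 0 k (by omega)
    rw [← hFeq]
    intro hFnil
    rw [hFnil] at hsumF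
    have : t.length ≠ 0 := by simpa using hne
    simp at hsumF
    omega

-- ===== VERDICT (by name: the statement is the Claim_ definition above) =====
theorem solution_spec : Claim_equal_solution := by
  intro k t _hdom hpre
  obtain ⟨hne, hkle, hr⟩ := hpre
  unfold Spec_solution
  exact solution_eq_alt k t hne hkle hr
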